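-- pv_equiv track=rewrite | github.com/Sanieeme/pythonJan | test_prep_intermediate/3/3.prep.py | draw_pyramid
-- ===== SOURCE A (Python) =====
-- def draw_pyramid(height):
--     width = 2 * height - 1
--
--     my_list = []
--     for rows in range(height):
--         space = ""
--         for cols in range(width):
--             if rows == height - 1:
--                 space += "*"
--             elif cols == height - 1 - rows or cols == height - 1 + rows:
--                 space += "*"
--             else:
--                 space += " "
--         my_list.append(space)
--     return my_list
-- ===== SOURCE B (Python) =====
-- def _row(height, r):
--     if r == height - 1:
--         return "*" * (2 * height - 1)
--     side = " " * (height - 1 - r)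
--     if r == 0:
--         return side + "*" + side
--     return side + "*" + " " * (2 * r - 1) + "*" + side
--
--
-- def draw_pyramid(height):
--     return [_row(height, r) for r in range(height)]
-- ===== Notes on version B (the rewrite author's own statement) =====
-- stated objective: simpler
-- what changed: B drops the inner per-character loop: each row is built directly from arithmetic star positions by concatenating replicated space/star blocks (a row helper plus a comprehension), instead of scanning every column and appending one tested character at a time.
import Mathlib
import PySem

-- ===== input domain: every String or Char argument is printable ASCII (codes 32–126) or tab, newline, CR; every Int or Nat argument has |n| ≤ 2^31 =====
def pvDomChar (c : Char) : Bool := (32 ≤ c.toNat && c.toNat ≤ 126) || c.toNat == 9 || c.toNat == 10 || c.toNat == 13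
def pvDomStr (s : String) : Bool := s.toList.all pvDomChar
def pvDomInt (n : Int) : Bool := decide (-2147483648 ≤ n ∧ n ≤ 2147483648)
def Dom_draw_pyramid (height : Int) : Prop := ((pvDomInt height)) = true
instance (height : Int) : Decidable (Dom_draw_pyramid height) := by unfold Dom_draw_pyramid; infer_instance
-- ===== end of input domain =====

-- B builds each row by direct arithmetic block placement (side spaces, star(s), gap) instead of
-- A's per-character inner loop testing each column; objective: simpler.

-- ===== PORT A =====
-- strings are ported through List Char (PySem convention); String.ofList packs the built row
def draw_pyramid (height : Int) : List String :=
  let width := 2 * height - 1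
  (PySem.List.pyRange 0 height 1).foldl (fun my_list rows =>
    let space := (PySem.List.pyRange 0 width 1).foldl (fun space cols =>
      if rows = height - 1 then space ++ ['*']
      else if cols = height - 1 - rows ∨ cols = height - 1 + rows then space ++ ['*']
      else space ++ [' ']) ([] : List Char)
    my_list ++ [String.ofList space]) []

-- ===== PORT B =====
def pyramidRow (height r : Int) : String :=
  if r = height - 1 then String.ofList (List.replicate (2 * height - 1).toNat '*')
  else
    let side := List.replicate (height - 1 - r).toNat ' '
    if r = 0 then String.ofList (side ++ ['*'] ++ side)
    else String.ofList (side ++ ['*'] ++ List.replicate (2 * r - 1).toNat ' ' ++ ['*'] ++ side)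

def draw_pyramid_alt (height : Int) : List String :=
  (PySem.List.pyRange 0 height 1).map (fun r => pyramidRow height r)

-- ===== PRECONDITION & SPEC =====
def Spec_draw_pyramid (height : Int) (out : List String) : Prop := out = draw_pyramid_alt height
instance (height : Int) (out : List String) : Decidable (Spec_draw_pyramid height out) := by unfold Spec_draw_pyramid; infer_instance

-- ===== CLAIM (what is proved, stated in full; the proofs are below) =====
def Claim_equal_draw_pyramid : Prop := ∀ (height : Int), Dom_draw_pyramid height → Spec_draw_pyramid height (draw_pyramid height)

-- ===== LEMMAS AND PROOFS =====

-- constant map over a pyRange is a replicate block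
theorem map_pyRange_const {α : Type} (a b : Int) (c : α)
    (f : Int → α) (hf : ∀ x, a ≤ x → x < b → f x = c) :
    (PySem.List.pyRange a b 1).map f = List.replicate (b - a).toNat c := by
  have h1 : (PySem.List.pyRange a b 1).map f = (PySem.List.pyRange a b 1).map (fun _ => c) := by
    apply List.map_congr_left
    intro x hx
    rw [PySem.List.mem_pyRange_one] at hx
    exact hf x hx.1 hx.2
  rw [h1, List.map_const', PySem.List.length_pyRange_one]

-- the character A's inner loop writes at column `cols`
def pyramidChar (height rows cols : Int) : Char :=
  if rows = height - 1 then '*'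
  else if cols = height - 1 - rows ∨ cols = height - 1 + rows then '*'
  else ' '

-- A's inner fold is the columnwise map
theorem inner_fold_eq_map (height rows w : Int) :
    (PySem.List.pyRange 0 w 1).foldl (fun space cols =>
      if rows = height - 1 then space ++ ['*']
      else if cols = height - 1 - rows ∨ cols = height - 1 + rows then space ++ ['*']
      else space ++ [' ']) ([] : List Char)
    = (PySem.List.pyRange 0 w 1).map (pyramidChar height rows) := by
  have hfun : (fun (space : List Char) cols =>
      if rows = height - 1 then space ++ ['*']
      else if cols = height - 1 - rows ∨ cols = height - 1 + rows then space ++ ['*']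
      else space ++ [' ']) = fun space cols => space ++ [pyramidChar height rows cols] := by
    funext s c
    unfold pyramidChar
    split_ifs <;> rfl
  rw [hfun, PySem.List.foldl_append_singleton_eq_map, List.nil_append]

-- A's row equals B's row for every admitted row index
theorem row_eq (height rows : Int) (h0 : 0 ≤ rows) (hlt : rows < height) :
    String.ofList ((PySem.List.pyRange 0 (2 * height - 1) 1).map (pyramidChar height rows))
    = pyramidRow height rows := by
  unfold pyramidRow
  by_cases hlast : rows = height - 1
  · simp only [hlast, if_pos]
    congr 1
    rw [map_pyRange_const 0 (2 * height - 1) '*' _ (fun x _ _ => by simp [pyramidChar])]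
    norm_num
  · simp only [if_neg hlast]
    have hr : rows < height - 1 := lt_of_le_of_ne (by omega) hlast
    set L := height - 1 - rows with hL
    set R := height - 1 + rows with hR
    have hchar_lt : ∀ x, 0 ≤ x → x < L → pyramidChar height rows x = ' ' := by
      intro x _ hx; unfold pyramidChar
      rw [if_neg hlast, if_neg]; omega
    have hchar_star : pyramidChar height rows L = '*' := by
      unfold pyramidChar; rw [if_neg hlast, if_pos]; left; rfl
    have hchar_starR : pyramidChar height rows R = '*' := by
      unfold pyramidChar; rw [if_neg hlast, if_pos]; right; rfl
    have hchar_mid : ∀ x, L < x → x < R → pyramidChar height rows x = ' ' := by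
      intro x hx1 hx2; unfold pyramidChar
      rw [if_neg hlast, if_neg]; omega
    have hchar_hi : ∀ x, R < x → pyramidChar height rows x = ' ' := by
      intro x hx; unfold pyramidChar
      rw [if_neg hlast, if_neg]; omega
    by_cases h0r : rows = 0
    · subst h0r
      simp only []
      have hsplit : PySem.List.pyRange 0 (2 * height - 1) 1
          = PySem.List.pyRange 0 L 1 ++ PySem.List.pyRange L (L + 1) 1
            ++ PySem.List.pyRange (L + 1) (2 * height - 1) 1 := by
        rw [← PySem.List.pyRange_one_append 0 L (L + 1) (by omega) (by omega),
            ← PySem.List.pyRange_one_append 0 (L + 1) (2 * height - 1) (by omega) (by omega)]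
      rw [hsplit]
      congr 1
      simp only [List.map_append, PySem.List.pyRange_one_singleton, List.map_singleton]
      rw [map_pyRange_const 0 L ' ' _ (fun x hx1 hx2 => hchar_lt x hx1 hx2),
          map_pyRange_const (L + 1) (2 * height - 1) ' ' _
            (fun x hx1 _ => hchar_hi x (by omega)),
          hchar_star]
      have e1 : (L - 0).toNat = (height - 1 - 0).toNat := by omega
      have e2 : (2 * height - 1 - (L + 1)).toNat = (height - 1 - 0).toNat := by omega
      rw [e1, e2]
    · simp only [if_neg h0r]
      have hsplit : PySem.List.pyRange 0 (2 * height - 1) 1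
          = PySem.List.pyRange 0 L 1 ++ PySem.List.pyRange L (L + 1) 1
            ++ PySem.List.pyRange (L + 1) R 1 ++ PySem.List.pyRange R (R + 1) 1
            ++ PySem.List.pyRange (R + 1) (2 * height - 1) 1 := by
        rw [← PySem.List.pyRange_one_append 0 L (L + 1) (by omega) (by omega),
            ← PySem.List.pyRange_one_append 0 (L + 1) R (by omega) (by omega),
            ← PySem.List.pyRange_one_append 0 R (R + 1) (by omega) (by omega),
            ← PySem.List.pyRange_one_append 0 (R + 1) (2 * height - 1) (by omega) (by omega)]
      rw [hsplit]
      congr 1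
      simp only [List.map_append, PySem.List.pyRange_one_singleton, List.map_singleton]
      rw [map_pyRange_const 0 L ' ' _ (fun x hx1 hx2 => hchar_lt x hx1 hx2),
          map_pyRange_const (L + 1) R ' ' _ (fun x hx1 hx2 => hchar_mid x (by omega) hx2),
          map_pyRange_const (R + 1) (2 * height - 1) ' ' _
            (fun x hx1 _ => hchar_hi x (by omega)),
          hchar_star, hchar_starR]
      have e1 : (R - (L + 1)).toNat = (2 * rows - 1).toNat := by omega
      have e2 : (2 * height - 1 - (R + 1)).toNat = (height - 1 - rows).toNat := by omega
      have e3 : (L - 0).toNat = (height - 1 - rows).toNat := by omega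
      rw [e1, e2, e3]

-- ===== VERDICT (by name: the statement is the Claim_ definition above) =====
theorem draw_pyramid_spec : Claim_equal_draw_pyramid := by
  intro height _
  unfold Spec_draw_pyramid draw_pyramid draw_pyramid_alt
  simp only []
  have houter := PySem.List.foldl_append_singleton_eq_map
      (fun rows : Int => String.ofList ((PySem.List.pyRange 0 (2 * height - 1) 1).foldl (fun space cols =>
        if rows = height - 1 then space ++ ['*']
        else if cols = height - 1 - rows ∨ cols = height - 1 + rows then space ++ ['*']
        else space ++ [' ']) ([] : List Char)))
      (PySem.List.pyRange 0 height 1) ([] : List String)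
  simp only [List.nil_append] at houter
  rw [houter]
  apply List.map_congr_left
  intro rows hmem
  rw [PySem.List.mem_pyRange_one] at hmem
  rw [inner_fold_eq_map, row_eq height rows hmem.1 hmem.2]
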